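-- pv_equiv track=rewrite | github.com/vGiacomov/Probably-Useless-Scripts | lorem ipsum generator/Source Code/main.py | generate_lorem_ipsum
-- ===== SOURCE A (Python) =====
-- def generate_lorem_ipsum(length):
--     lorem_ipsum = (
--         "Lorem ipsum dolor sit amet, consectetur adipiscing elit. "
--         "Sed do eiusmod tempor incididunt ut labore et dolore magna aliqua. "
--         "Ut enim ad minim veniam, quis nostrud exercitation ullamco laboris "
--         "nisi ut aliquip ex ea commodo consequat. Duis aute irure dolor in "
--         "reprehenderit in voluptate velit esse cillum dolore eu fugiat nulla "
--         "pariatur. Excepteur sint occaecat cupidatat non proident, sunt in "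
--         "culpa qui officia deserunt mollit anim id est laborum."
--     )
--     result = []
--     current_length = 0
--     while current_length < length:
--         remaining_length = length - current_length
--         if remaining_length >= len(lorem_ipsum):
--             result.append(lorem_ipsum)
--             current_length += len(lorem_ipsum)
--         else:
--             result.append(lorem_ipsum[:remaining_length])
--             current_length += remaining_length
--
--     return ''.join(result)
-- ===== SOURCE B (Python) =====
-- def generate_lorem_ipsum(length):
--     lorem_ipsum = (
--         "Lorem ipsum dolor sit amet, consectetur adipiscing elit. "
--         "Sed do eiusmod tempor incididunt ut labore et dolore magna aliqua. "
--         "Ut enim ad minim veniam, quis nostrud exercitation ullamco laboris "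
--         "nisi ut aliquip ex ea commodo consequat. Duis aute irure dolor in "
--         "reprehenderit in voluptate velit esse cillum dolore eu fugiat nulla "
--         "pariatur. Excepteur sint occaecat cupidatat non proident, sunt in "
--         "culpa qui officia deserunt mollit anim id est laborum."
--     )
--     n = max(length, 0)
--     L = len(lorem_ipsum)
--     parts = [lorem_ipsum] * (n // L) + [lorem_ipsum[:n % L]]
--     return ''.join(parts)
-- ===== Notes on version B (the rewrite author's own statement) =====
-- stated objective: simpler
-- what changed: Replaces the accumulation while-loop with a closed form: n // L full copies of the fixed text plus the n % L-character prefix (negative length clamped to 0).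
import Mathlib
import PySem

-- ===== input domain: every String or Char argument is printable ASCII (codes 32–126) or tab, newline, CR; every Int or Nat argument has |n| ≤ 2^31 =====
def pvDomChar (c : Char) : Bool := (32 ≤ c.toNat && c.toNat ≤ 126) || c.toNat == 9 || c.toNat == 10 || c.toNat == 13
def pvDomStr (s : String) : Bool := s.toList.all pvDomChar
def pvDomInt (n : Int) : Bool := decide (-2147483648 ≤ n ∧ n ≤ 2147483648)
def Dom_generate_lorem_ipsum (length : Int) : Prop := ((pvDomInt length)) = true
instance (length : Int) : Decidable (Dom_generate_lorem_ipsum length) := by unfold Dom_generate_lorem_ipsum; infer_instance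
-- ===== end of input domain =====

set_option maxRecDepth 10000


-- B replaces A's accumulation loop by the closed form: n // L full copies plus the
-- (n % L)-character prefix, with negative length clamped to 0 (objective: simpler).

-- ===== PORT A =====
def pvLorem : String := "Lorem ipsum dolor sit amet, consectetur adipiscing elit. Sed do eiusmod tempor incididunt ut labore et dolore magna aliqua. Ut enim ad minim veniam, quis nostrud exercitation ullamco laboris nisi ut aliquip ex ea commodo consequat. Duis aute irure dolor in reprehenderit in voluptate velit esse cillum dolore eu fugiat nulla pariatur. Excepteur sint occaecat cupidatat non proident, sunt in culpa qui officia deserunt mollit anim id est laborum."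

theorem pvStrLen : PySem.Str.len pvLorem = 445 := by decide

-- the while loop of A: state (current_length, result); 'remaining_length' is
-- inlined as (length - current)
def pvLoopA (length current : Int) (acc : List String) : List String :=
  if current < length then
    if length - current ≥ PySem.Str.len pvLorem then
      pvLoopA length (current + PySem.Str.len pvLorem) (acc ++ [pvLorem])
    else
      pvLoopA length (current + (length - current))
        (acc ++ [PySem.Str.slice pvLorem none (some (length - current))])
  else acc
termination_by (length - current).toNat
decreasing_by
  · have := pvStrLen; omega
  · omega

def generate_lorem_ipsum (length : Int) : String :=
  PySem.Str.join "" (pvLoopA length 0 [])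

-- ===== PORT B =====
def generate_lorem_ipsum_alt (length : Int) : String :=
  let n := max length 0
  let L := PySem.Str.len pvLorem
  let parts := PySem.List.pyRepeat [pvLorem] (PySem.Int.floordiv n L)
      ++ [PySem.Str.slice pvLorem none (some (PySem.Int.mod n L))]
  PySem.Str.join "" parts

-- ===== PRECONDITION & SPEC =====
def Spec_generate_lorem_ipsum (length : Int) (out : String) : Prop := out = generate_lorem_ipsum_alt length
instance (length : Int) (out : String) : Decidable (Spec_generate_lorem_ipsum length out) := by unfold Spec_generate_lorem_ipsum; infer_instance

-- ===== CLAIM (what is proved, stated in full; the proofs are below) =====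
def Claim_equal_generate_lorem_ipsum : Prop := ∀ (length : Int), Dom_generate_lorem_ipsum length → Spec_generate_lorem_ipsum length (generate_lorem_ipsum length)

-- ===== LEMMAS AND PROOFS =====

-- the characters B produces for a requested (clamped) length r
def pvF (r : Nat) : List Char :=
  (List.replicate (r / 445) pvLorem.toList).flatten ++ pvLorem.toList.take (r % 445)

theorem pvF_ge (r : Nat) (h : 445 ≤ r) : pvF r = pvLorem.toList ++ pvF (r - 445) := by
  unfold pvF
  rw [show r / 445 = (r - 445) / 445 + 1 by omega,
      show r % 445 = (r - 445) % 445 by omega]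
  simp [List.replicate_succ]

theorem pvF_lt (r : Nat) (h : r < 445) : pvF r = pvLorem.toList.take r := by
  unfold pvF
  rw [Nat.div_eq_of_lt h, Nat.mod_eq_of_lt h]
  simp

-- loop invariant: the joined characters of the loop's result
theorem pvF_zero : pvF 0 = [] := by
  unfold pvF; simp

-- ''.join over chars is flatten
theorem pvJoin_empty (parts : List (List Char)) :
    PySem.Chars.join [] parts = parts.flatten := by
  induction parts with
  | nil => simp [PySem.Chars.join_nil]
  | cons p rest ih =>
    cases rest with
    | nil => simp [PySem.Chars.join_singleton]
    | cons q r => rw [PySem.Chars.join_cons_cons]; simp_all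

theorem pvSlice_chars (b : Int) (hb : 0 ≤ b) :
    (PySem.Str.slice pvLorem none (some b)).toList = pvLorem.toList.take b.toNat := by
  rw [PySem.Str.toList_slice, PySem.Chars.slice_eq_listSlice, PySem.List.slice_to _ hb]

-- loop invariant: the joined characters of the loop's result
theorem pvLoopA_chars (length current : Int) (acc : List String) :
    ((pvLoopA length current acc).map String.toList).flatten =
      (acc.map String.toList).flatten ++ pvF (length - current).toNat := by
  induction current, acc using pvLoopA.induct length with
  | case1 current acc hlt hge ih =>
    rw [pvLoopA, if_pos hlt, if_pos hge]
    rw [pvStrLen] at hge ih ⊢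
    rw [ih]
    have h445 : length - current ≥ 445 := by omega
    rw [pvF_ge (length - current).toNat (by omega)]
    rw [show (length - (current + 445)).toNat = (length - current).toNat - 445 from by omega]
    simp only [List.map_append, List.flatten_append, List.map_cons, List.map_nil,
      List.flatten_cons, List.flatten_nil, List.append_nil, List.append_assoc]
  | case2 current acc hlt hge ih =>
    rw [pvLoopA, if_pos hlt, if_neg hge, ih]
    have hlt445 : length - current < 445 := by rw [pvStrLen] at hge; omega
    have h0 : length - (current + (length - current)) = 0 := by omega
    rw [h0]
    simp only [Int.toNat_zero, pvF_zero, List.append_nil, List.map_append,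
      List.flatten_append, List.map_cons, List.map_nil, List.flatten_cons,
      List.flatten_nil, List.append_nil]
    rw [pvSlice_chars (length - current) (by omega),
        pvF_lt (length - current).toNat (by omega)]
  | case3 current acc hlt =>
    rw [pvLoopA, if_neg hlt]
    have h0 : (length - current).toNat = 0 := by omega
    rw [h0, pvF_zero, List.append_nil]

theorem pvFdiv_cast (m : Nat) : PySem.Int.floordiv (m : Int) 445 = ((m / 445 : Nat) : Int) := by
  show Int.fdiv (m:Int) 445 = _
  rw [show (445:Int) = ((445:Nat):Int) by norm_num, ← Int.ofNat_fdiv]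

theorem pvFmod_cast (m : Nat) : PySem.Int.mod (m : Int) 445 = ((m % 445 : Nat) : Int) := by
  show Int.fmod (m:Int) 445 = _
  rw [show (445:Int) = ((445:Nat):Int) by norm_num, ← Int.ofNat_fmod]

theorem generate_lorem_ipsum_spec : Claim_equal_generate_lorem_ipsum := by
  intro length _
  unfold Spec_generate_lorem_ipsum generate_lorem_ipsum generate_lorem_ipsum_alt
  apply String.toList_inj.mp
  rw [PySem.Str.toList_join, PySem.Str.toList_join]
  rw [show ("" : String).toList = [] from rfl, pvJoin_empty, pvJoin_empty]
  rw [pvLoopA_chars length 0 []]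
  simp only [pvStrLen]
  rw [show max length 0 = ((length.toNat : Nat) : Int) from (Int.ofNat_toNat length).symm]
  rw [pvFdiv_cast, pvFmod_cast, PySem.List.pyRepeat_singleton]
  simp only [List.map_nil, List.flatten_nil, List.nil_append, Int.sub_zero,
    List.map_append, List.flatten_append, List.map_cons, List.flatten_cons,
    List.flatten_nil, List.append_nil, List.map_replicate, Int.toNat_natCast]
  rw [pvSlice_chars ((length.toNat % 445 : Nat) : Int) (by positivity)]
  unfold pvF
  simp only [Int.toNat_natCast]
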